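-- pv_equiv track=rewrite | github.com/calcut/dwt-optical | CodeLayoutWithExplanation/GeneralFunctions_17_11_21.py | IsolateNames
-- ===== SOURCE A (Python) =====
-- def IsolateNames(Names):
--     SampleArray=[]
--     for i in range(len(Names)):
--         Counter=0
--         Name=Names[i]
--         for j in range(len(Name)):
--             Char=Name[j]
--             if Char=='(' and Counter==0:
--                 Counter=Counter+1
--                 cut_start=j
--             if Counter==1:
--                 Test=Char.isnumeric()
--                 if Test==True:
--                     Counter=Counter+1
--             if Counter==2 and Char==')':
--                 Sample=Name[0:cut_start]
--                 SampleArray.append(Sample)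
--
--
--     return SampleArray
-- ===== SOURCE B (Python) =====
-- def IsolateNames(Names):
--     out = []
--     for name in Names:
--         i = name.find('(')
--         if i == -1:
--             continue
--         k = next((k for k in range(i + 1, len(name)) if name[k].isnumeric()), None)
--         if k is None:
--             continue
--         out.extend([name[:i]] * name.count(')', k + 1))
--     return out
-- ===== Notes on version B (the rewrite author's own statement) =====
-- stated objective: simpler
-- what changed: Replaces the three-state counter scan per name with direct searches: find the first '(', find the first numeric char after it, then count ')' after that digit and emit that many copies of the prefix.
import Mathlib
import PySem

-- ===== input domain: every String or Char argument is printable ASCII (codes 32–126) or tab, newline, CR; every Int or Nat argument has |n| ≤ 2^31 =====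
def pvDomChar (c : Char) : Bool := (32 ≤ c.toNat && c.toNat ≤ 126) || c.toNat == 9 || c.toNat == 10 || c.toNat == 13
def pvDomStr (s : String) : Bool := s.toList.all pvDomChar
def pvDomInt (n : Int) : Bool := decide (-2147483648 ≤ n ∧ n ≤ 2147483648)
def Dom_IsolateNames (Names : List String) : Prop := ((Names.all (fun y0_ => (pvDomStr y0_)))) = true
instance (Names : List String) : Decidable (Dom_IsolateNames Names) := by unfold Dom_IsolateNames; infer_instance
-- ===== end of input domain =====

-- B replaces A's three-state counter scan by direct find/count passes; objective: simpler.

-- ===== PORT A =====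
-- One step of A's inner loop body at position j; state = (Counter, cut_start, SampleArray).
-- Char.isDigit is exact for Python's str.isnumeric on the printable-ASCII domain.
def pvStepA (Name : List Char) (st : Nat × Nat × List String) (j : Nat) : Nat × Nat × List String :=
  let Char := Name.getD j ' '
  let (Counter, cut_start, SampleArray) := st
  let (Counter, cut_start) :=
    if Char = '(' ∧ Counter = 0 then (Counter + 1, j) else (Counter, cut_start)
  let Counter := if Counter = 1 ∧ Char.isDigit then Counter + 1 else Counter
  let SampleArray :=
    if Counter = 2 ∧ Char = ')' then SampleArray ++ [String.ofList (Name.take cut_start)]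
    else SampleArray
  (Counter, cut_start, SampleArray)

def IsolateNames (Names : List String) : List String :=
  (Names.foldl (fun SampleArray Name =>
      ((List.range Name.toList.length).foldl (pvStepA Name.toList) (0, 0, SampleArray)).2.2)
    [])

-- ===== PORT B =====
def IsolateNames_alt (Names : List String) : List String :=
  Names.foldl (fun out name =>
    match name.toList.findIdx? (· = '(') with
    | none => out
    | some i =>
      let rest := name.toList.drop (i + 1)
      match rest.findIdx? Char.isDigit with
      | none => out
      | some k =>
        out ++ List.replicate ((rest.drop (k + 1)).count ')') (String.ofList (name.toList.take i)))
    []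

-- ===== PRECONDITION & SPEC =====
def Spec_IsolateNames (Names : List String) (out : List String) : Prop := out = IsolateNames_alt Names
instance (Names : List String) (out : List String) : Decidable (Spec_IsolateNames Names out) := by unfold Spec_IsolateNames; infer_instance

-- ===== CLAIM (what is proved, stated in full; the proofs are below) =====
def Claim_equal_IsolateNames : Prop := ∀ (Names : List String), Dom_IsolateNames Names → Spec_IsolateNames Names (IsolateNames Names)

-- ===== LEMMAS AND PROOFS =====

-- fold of A's inner loop over positions j, j+1, …, cs.length-1
def pvFoldFrom (cs : List Char) (j : Nat) (st : Nat × Nat × List String) : Nat × Nat × List String :=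
  (List.range' j (cs.length - j)).foldl (pvStepA cs) st

theorem pvFoldFrom_stop (cs : List Char) (j : Nat) (h : cs.length ≤ j) (st : Nat × Nat × List String) :
    pvFoldFrom cs j st = st := by
  unfold pvFoldFrom
  rw [Nat.sub_eq_zero_of_le h]
  rfl

theorem pvFoldFrom_step (cs : List Char) (j : Nat) (h : j < cs.length) (st : Nat × Nat × List String) :
    pvFoldFrom cs j st = pvFoldFrom cs (j + 1) (pvStepA cs st j) := by
  unfold pvFoldFrom
  have : cs.length - j = (cs.length - (j + 1)) + 1 := by omega
  rw [this, List.range'_succ]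
  rfl

theorem pvStepA0_paren (cs : List Char) (j cut : Nat) (acc : List String)
    (h : j < cs.length) (hc : cs[j] = '(') :
    pvStepA cs (0, cut, acc) j = (1, j, acc) := by
  unfold pvStepA
  rw [List.getD_eq_getElem cs ' ' h, hc]
  norm_num
  exact ⟨by decide, by decide⟩

theorem pvStepA0_other (cs : List Char) (j cut : Nat) (acc : List String)
    (h : j < cs.length) (hc : ¬ cs[j] = '(') :
    pvStepA cs (0, cut, acc) j = (0, cut, acc) := by
  unfold pvStepA
  rw [List.getD_eq_getElem cs ' ' h]
  simp [hc]

theorem pvStepA1_digit (cs : List Char) (j cut : Nat) (acc : List String)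
    (h : j < cs.length) (hc : (cs[j]).isDigit) :
    pvStepA cs (1, cut, acc) j = (2, cut, acc) := by
  unfold pvStepA
  rw [List.getD_eq_getElem cs ' ' h]
  have h1 : ¬ (cs[j] = '(' ∧ (1 : Nat) = 0) := by rintro ⟨_, h2⟩; omega
  have h3 : ¬ cs[j] = ')' := by intro he; rw [he] at hc; simp [Char.isDigit] at hc
  simp [hc, h3]

theorem pvStepA1_other (cs : List Char) (j cut : Nat) (acc : List String)
    (h : j < cs.length) (hc : ¬ (cs[j]).isDigit) :
    pvStepA cs (1, cut, acc) j = (1, cut, acc) := by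
  unfold pvStepA
  rw [List.getD_eq_getElem cs ' ' h]
  have h1 : ¬ (cs[j] = '(' ∧ (1 : Nat) = 0) := by rintro ⟨_, h2⟩; omega
  simp [hc]

theorem pvStepA2 (cs : List Char) (j cut : Nat) (acc : List String)
    (h : j < cs.length) :
    pvStepA cs (2, cut, acc) j =
      (2, cut, if cs[j] = ')' then acc ++ [String.ofList (cs.take cut)] else acc) := by
  unfold pvStepA
  rw [List.getD_eq_getElem cs ' ' h]
  simp

-- In state 2, every later ')' appends one copy of the prefix.
theorem pvState2 (cs : List Char) (j : Nat) (cut : Nat) (acc : List String) :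
    pvFoldFrom cs j (2, cut, acc) =
      (2, cut, acc ++ List.replicate ((cs.drop j).count ')') (String.ofList (cs.take cut))) := by
  by_cases h : j < cs.length
  · have hd : cs.drop j = cs[j] :: cs.drop (j + 1) := List.drop_eq_getElem_cons h
    rw [pvFoldFrom_step cs j h, pvStepA2 cs j cut acc h, hd]
    by_cases hc : cs[j] = ')'
    · rw [if_pos hc, hc, List.count_cons_self, pvState2 cs (j + 1) cut,
        List.append_assoc, List.singleton_append, ← List.replicate_succ]
    · rw [if_neg hc, List.count_cons_of_ne (by simpa using hc), pvState2 cs (j + 1) cut]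
  · rw [pvFoldFrom_stop cs j (by omega), List.drop_eq_nil_of_le (by omega)]
    simp
termination_by cs.length - j

-- In state 1, the first later digit switches to state 2.
theorem pvState1 (cs : List Char) (j : Nat) (cut : Nat) (acc : List String) :
    pvFoldFrom cs j (1, cut, acc) =
      (match (cs.drop j).findIdx? Char.isDigit with
       | none => (1, cut, acc)
       | some k => (2, cut, acc ++ List.replicate ((cs.drop (j + k + 1)).count ')') (String.ofList (cs.take cut)))) := by
  by_cases h : j < cs.length
  · have hd : cs.drop j = cs[j] :: cs.drop (j + 1) := List.drop_eq_getElem_cons h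
    rw [pvFoldFrom_step cs j h]
    by_cases hc : (cs[j]).isDigit
    · rw [pvStepA1_digit cs j cut acc h hc, pvState2 cs (j + 1) cut acc, hd,
        List.findIdx?_cons, if_pos hc]
    · rw [pvStepA1_other cs j cut acc h hc, pvState1 cs (j + 1) cut acc, hd,
        List.findIdx?_cons, if_neg hc]
      cases hk : (cs.drop (j + 1)).findIdx? Char.isDigit with
      | none => simp
      | some k =>
        simp only [Option.map_some]
        have : j + (k + 1) + 1 = j + 1 + k + 1 := by omega
        simp [this]
  · rw [pvFoldFrom_stop cs j (by omega), List.drop_eq_nil_of_le (by omega)]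
    simp
termination_by cs.length - j

-- In state 0, the first later '(' switches to state 1 with cut = its index.
theorem pvState0 (cs : List Char) (j : Nat) (cut : Nat) (acc : List String) :
    pvFoldFrom cs j (0, cut, acc) =
      (match (cs.drop j).findIdx? (fun c => c = '(') with
       | none => (0, cut, acc)
       | some f => pvFoldFrom cs (j + f + 1) (1, j + f, acc)) := by
  by_cases h : j < cs.length
  · have hd : cs.drop j = cs[j] :: cs.drop (j + 1) := List.drop_eq_getElem_cons h
    rw [pvFoldFrom_step cs j h]
    by_cases hc : cs[j] = '('
    · rw [pvStepA0_paren cs j cut acc h hc, hd, List.findIdx?_cons, if_pos (by simp [hc])]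
      rfl
    · rw [pvStepA0_other cs j cut acc h hc, pvState0 cs (j + 1) cut acc, hd,
        List.findIdx?_cons, if_neg (by simp [hc])]
      cases hk : (cs.drop (j + 1)).findIdx? (fun c => c = '(') with
      | none => simp
      | some f =>
        simp only [Option.map_some]
        have e1 : j + (f + 1) + 1 = j + 1 + f + 1 := by omega
        have e2 : j + (f + 1) = j + 1 + f := by omega
        rw [e1, e2]
  · rw [pvFoldFrom_stop cs j (by omega), List.drop_eq_nil_of_le (by omega)]
    simp
termination_by cs.length - j

-- Per-name equality of the two loop bodies.
theorem pvName_eq (cs : List Char) (acc : List String) :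
    ((List.range cs.length).foldl (pvStepA cs) (0, 0, acc)).2.2 =
      (match cs.findIdx? (fun c => c = '(') with
       | none => acc
       | some i =>
         match (cs.drop (i + 1)).findIdx? Char.isDigit with
         | none => acc
         | some k =>
           acc ++ List.replicate (((cs.drop (i + 1)).drop (k + 1)).count ')') (String.ofList (cs.take i))) := by
  have h0 : (List.range cs.length).foldl (pvStepA cs) (0, 0, acc) = pvFoldFrom cs 0 (0, 0, acc) := by
    unfold pvFoldFrom
    rw [List.range_eq_range']
    rfl
  rw [h0, pvState0 cs 0 0 acc]
  simp only [List.drop_zero, Nat.zero_add]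
  cases hi : cs.findIdx? (fun c => c = '(') with
  | none => rfl
  | some i =>
    simp only []
    rw [pvState1 cs (i + 1) i acc]
    cases hk : (cs.drop (i + 1)).findIdx? Char.isDigit with
    | none => rfl
    | some k =>
      simp only [List.drop_drop]
      have e : i + 1 + k + 1 = i + 1 + (k + 1) := by omega
      rw [e]

theorem pvFold_eq (Names : List String) : IsolateNames Names = IsolateNames_alt Names := by
  unfold IsolateNames IsolateNames_alt
  induction Names using List.reverseRecOn with
  | nil => rfl
  | append_singleton xs x ih =>
    rw [List.foldl_append, List.foldl_append, List.foldl_cons, List.foldl_nil,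
      List.foldl_cons, List.foldl_nil, ih, pvName_eq x.toList]

-- ===== VERDICT (by name: the statement is the Claim_ definition above) =====
theorem IsolateNames_spec : Claim_equal_IsolateNames := by
  intro Names _
  exact pvFold_eq Names
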